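-- pv_equiv track=rewrite | github.com/emerson-proenca/get50 | scripts/gem.py | clean_commands
-- ===== SOURCE A (Python) =====
-- def clean_commands(commands: list[str]) -> list[str]:
--     """
--     Filter commands to only keep the actual setup sequence.
--     Stops at the first command that isn't part of the standard workflow.
--     """
--     if not commands:
--         return []
--
--     # Valid command prefixes for setup
--     valid_prefixes = ("wget ", "unzip ", "rm ", "cd ", "ls", "mkdir ", "code ")
--
--     cleaned = []
--
--     for cmd in commands:
--         # Stop if we hit a command that's not part of setup
--         if not cmd.startswith(valid_prefixes):
--             break
--
--         # Keep valid commands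
--         cleaned.append(cmd)
--
--         # If we hit 'ls', stop (next items are file listings)
--         if cmd.strip() == "ls":
--             break
--
--     return cleaned
-- ===== SOURCE B (Python) =====
-- def clean_commands(commands: list[str]) -> list[str]:
--     valid_prefixes = ("wget ", "unzip ", "rm ", "cd ", "ls", "mkdir ", "code ")
--     run_end = next(
--         (i for i, c in enumerate(commands) if not c.startswith(valid_prefixes)),
--         len(commands),
--     )
--     setup = commands[:run_end]
--     ls_at = next((i for i, c in enumerate(setup) if c.strip() == "ls"), None)
--     return setup if ls_at is None else setup[:ls_at + 1]
-- ===== Notes on version B (the rewrite author's own statement) =====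
-- stated objective: idiomatic
-- what changed: A's single loop that interleaves the validity break and the inclusive 'ls' break is split into two declarative phases: find the end of the leading valid run with next(enumerate), slice it out, then find the first stripped 'ls' in that run and slice inclusively.
import Mathlib
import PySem

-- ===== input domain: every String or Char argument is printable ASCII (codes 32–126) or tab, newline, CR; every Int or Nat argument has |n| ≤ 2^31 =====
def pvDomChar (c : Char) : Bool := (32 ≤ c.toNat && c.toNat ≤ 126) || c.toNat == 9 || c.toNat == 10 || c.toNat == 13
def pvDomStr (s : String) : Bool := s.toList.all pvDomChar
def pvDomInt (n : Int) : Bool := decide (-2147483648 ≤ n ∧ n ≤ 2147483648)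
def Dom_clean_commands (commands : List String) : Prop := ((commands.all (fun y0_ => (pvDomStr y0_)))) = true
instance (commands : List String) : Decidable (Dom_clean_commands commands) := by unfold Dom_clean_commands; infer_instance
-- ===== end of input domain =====

-- B replaces A's single interleaved loop by two phases (find the end of the valid run,
-- then truncate that run at the first stripped 'ls'); objective: idiomatic.

-- ===== PORT A =====
-- cmd.startswith(valid_prefixes): startswith against the tuple = any of the prefixes
def pvValid (cmd : String) : Bool :=
  ["wget ", "unzip ", "rm ", "cd ", "ls", "mkdir ", "code "].any
    (fun p => PySem.Str.startswith cmd p)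

def clean_commands (commands : List String) : List String :=
  match commands with
  | [] => []  -- 'if not commands: return []' (and the loop over an empty list)
  | cmd :: rest =>
    if !pvValid cmd then []                                -- break: not part of setup
    else if PySem.Str.strip cmd == "ls" then [cmd]         -- append, then break on 'ls'
    else cmd :: clean_commands rest                        -- append and continue

-- ===== PORT B =====
-- next((i for i, c in enumerate(xs) if p c), default none): index of first match
def pvFirstIdx (p : String → Bool) : List String → Option Nat
  | [] => none
  | c :: rest => if p c then some 0 else (pvFirstIdx p rest).map (· + 1)

def clean_commands_alt (commands : List String) : List String :=
  let runEnd := (pvFirstIdx (fun c => !pvValid c) commands).getD commands.length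
  let setup := commands.take runEnd   -- commands[:run_end], nonneg slice
  match pvFirstIdx (fun c => PySem.Str.strip c == "ls") setup with
  | none => setup
  | some i => setup.take (i + 1)      -- setup[:ls_at + 1]

-- ===== PRECONDITION & SPEC =====
def Spec_clean_commands (commands : List String) (out : List String) : Prop := out = clean_commands_alt commands
instance (commands : List String) (out : List String) : Decidable (Spec_clean_commands commands out) := by unfold Spec_clean_commands; infer_instance

-- ===== CLAIM (what is proved, stated in full; the proofs are below) =====
def Claim_equal_clean_commands : Prop := ∀ (commands : List String), Dom_clean_commands commands → Spec_clean_commands commands (clean_commands commands)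

-- ===== LEMMAS AND PROOFS =====
theorem clean_commands_eq_alt (commands : List String) :
    clean_commands commands = clean_commands_alt commands := by
  induction commands with
  | nil => rfl
  | cons cmd rest ih =>
    by_cases hv : pvValid cmd
    · by_cases hls : PySem.Str.strip cmd == "ls"
      · simp [clean_commands, clean_commands_alt, pvFirstIdx, hv, hls]
      · simp only [clean_commands, hv, Bool.not_true, Bool.false_eq_true, if_false, hls,
          if_true, ite_false]
        rw [ih]
        simp only [clean_commands_alt, pvFirstIdx, hv, Bool.not_true, if_false, hls, ite_false]
        cases hr : pvFirstIdx (fun c => !pvValid c) rest with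
        | none =>
          simp only [hr, Option.map_none, Option.getD_none, List.length_cons, List.take_succ_cons,
            List.take_length]
          cases hq : pvFirstIdx (fun c => PySem.Str.strip c == "ls") rest with
          | none => simp [pvFirstIdx, hls, hq]
          | some i => simp [pvFirstIdx, hls, hq]
        | some k =>
          simp only [hr, Option.map_some, Option.getD_some, List.take_succ_cons]
          cases hq : pvFirstIdx (fun c => PySem.Str.strip c == "ls") (rest.take k) with
          | none => simp [pvFirstIdx, hls, hq]
          | some i => simp [pvFirstIdx, hls, hq]
    · simp [clean_commands, clean_commands_alt, pvFirstIdx, hv]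

-- ===== VERDICT (by name: the statement is the Claim_ definition above) =====
theorem clean_commands_spec : Claim_equal_clean_commands := by
  intro commands _
  exact clean_commands_eq_alt commands
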